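-- pv_equiv track=rewrite | github.com/secary/chat-bi | skills/chatbi-dashboard-orchestration/scripts/dashboard_orchestration_core.py | infer_dashboard_intent
-- ===== SOURCE A (Python) =====
-- from typing import Any, Dict, List, Optional, Sequence, Tuple
--
-- def infer_dashboard_intent(
--     chart_assets: Sequence[Dict[str, Any]],
--     tables: Sequence[Dict[str, Any]],
-- ) -> str:
--     chart_types = {str(item.get("chart_type") or "") for item in chart_assets}
--     if "funnel" in chart_types:
--         return "funnel_analysis"
--     if "heatmap" in chart_types:
--         return "matrix_analysis"
--     if chart_types & {"line", "multi_line", "area"}: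
--         return "trend_analysis"
--     if chart_types & {"pie", "stacked_bar", "grouped_bar", "horizontal_bar", "bar"}:
--         return "comparison_analysis"
--     if tables:
--         return "detail_overview"
--     return "overview"
-- ===== SOURCE B (Python) =====
-- from typing import Any, Dict, List, Optional, Sequence, Tuple
--
-- _PRIORITY = {
--     "funnel": 0,
--     "heatmap": 1,
--     "line": 2, "multi_line": 2, "area": 2,
--     "pie": 3, "stacked_bar": 3, "grouped_bar": 3, "horizontal_bar": 3, "bar": 3,
-- }
-- _RESULTS = ["funnel_analysis", "matrix_analysis", "trend_analysis", "comparison_analysis"]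
--
-- def infer_dashboard_intent(
--     chart_assets: Sequence[Dict[str, Any]],
--     tables: Sequence[Dict[str, Any]],
-- ) -> str:
--     best = None
--     for item in chart_assets:
--         p = _PRIORITY.get(str(item.get("chart_type") or ""))
--         if p is not None and (best is None or p < best):
--             best = p
--     if best is not None:
--         return _RESULTS[best]
--     return "detail_overview" if tables else "overview"
-- ===== Notes on version B (the rewrite author's own statement) =====
-- stated objective: alternative
-- what changed: Replaced the build-a-set-then-cascade-of-membership/intersection-tests with a single pass over chart_assets that folds the minimum rule priority from a lookup table, then maps that priority to the result.
import Mathlib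
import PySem

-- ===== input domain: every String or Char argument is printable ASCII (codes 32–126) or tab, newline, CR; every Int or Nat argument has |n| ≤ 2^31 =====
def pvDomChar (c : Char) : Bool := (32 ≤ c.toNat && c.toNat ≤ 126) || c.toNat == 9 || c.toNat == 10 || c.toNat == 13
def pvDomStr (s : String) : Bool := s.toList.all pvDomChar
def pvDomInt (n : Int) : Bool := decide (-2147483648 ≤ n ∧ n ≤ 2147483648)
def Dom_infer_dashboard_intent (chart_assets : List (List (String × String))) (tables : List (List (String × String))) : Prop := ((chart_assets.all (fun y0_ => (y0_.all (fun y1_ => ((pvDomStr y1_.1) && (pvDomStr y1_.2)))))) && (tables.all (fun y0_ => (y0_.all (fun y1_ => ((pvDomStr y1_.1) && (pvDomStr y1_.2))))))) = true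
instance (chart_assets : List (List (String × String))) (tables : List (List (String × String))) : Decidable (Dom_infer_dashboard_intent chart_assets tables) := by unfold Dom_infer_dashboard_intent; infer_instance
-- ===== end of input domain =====

-- B replaces A's set-building plus cascade of membership/intersection tests by one fold over
-- chart_assets keeping the minimum triggered rule priority (alternative decomposition, same cost).

-- shared extraction `str(item.get("chart_type") or "")`: first-match lookup; a missing key or an
-- empty value both yield "" (values are strings here, so str(...) is the identity)
def pvChartType (item : List (String × String)) : String :=
  ((PySem.Dict.mk item).get? "chart_type").getD ""

-- ===== PORT A =====
def infer_dashboard_intent (chart_assets : List (List (String × String))) (tables : List (List (String × String))) : String :=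
  let chart_types : PySem.Set String := PySem.Set.ofList (chart_assets.map pvChartType)
  if "funnel" ∈ chart_types then "funnel_analysis"
  else if "heatmap" ∈ chart_types then "matrix_analysis"
  else if PySem.Set.inter chart_types ["line", "multi_line", "area"] ≠ [] then "trend_analysis"
  else if PySem.Set.inter chart_types ["pie", "stacked_bar", "grouped_bar", "horizontal_bar", "bar"] ≠ [] then "comparison_analysis"
  else if tables ≠ [] then "detail_overview"
  else "overview"

-- ===== PORT B =====
def pvPriority : PySem.Dict String Int :=
  PySem.Dict.ofList [("funnel", 0), ("heatmap", 1),
    ("line", 2), ("multi_line", 2), ("area", 2),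
    ("pie", 3), ("stacked_bar", 3), ("grouped_bar", 3), ("horizontal_bar", 3), ("bar", 3)]

def pvResults : List String :=
  ["funnel_analysis", "matrix_analysis", "trend_analysis", "comparison_analysis"]

-- the loop body: keep the smallest priority seen so far (None = nothing triggered yet)
def pvStep (best : Option Int) (item : List (String × String)) : Option Int :=
  match pvPriority.get? (pvChartType item) with
  | none => best
  | some p =>
    match best with
    | none => some p
    | some b => if p < b then some p else best

def infer_dashboard_intent_alt (chart_assets : List (List (String × String))) (tables : List (List (String × String))) : String :=
  let best := chart_assets.foldl pvStep none
  match best with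
  | some b => pvResults.getD b.toNat ""
  | none => if tables ≠ [] then "detail_overview" else "overview"

-- ===== PRECONDITION & SPEC =====
def Spec_infer_dashboard_intent (chart_assets : List (List (String × String))) (tables : List (List (String × String))) (out : String) : Prop := out = infer_dashboard_intent_alt chart_assets tables
instance (chart_assets : List (List (String × String))) (tables : List (List (String × String))) (out : String) : Decidable (Spec_infer_dashboard_intent chart_assets tables out) := by unfold Spec_infer_dashboard_intent; infer_instance

-- ===== CLAIM (what is proved, stated in full; the proofs are below) =====
def Claim_equal_infer_dashboard_intent : Prop := ∀ (chart_assets : List (List (String × String))) (tables : List (List (String × String))), Dom_infer_dashboard_intent chart_assets tables → Spec_infer_dashboard_intent chart_assets tables (infer_dashboard_intent chart_assets tables)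

-- ===== LEMMAS AND PROOFS =====

def pvOptMin : Option Int → Option Int → Option Int
  | none, b => b
  | some a, none => some a
  | some a, some p => if p < a then some p else some a

-- the minimum priority occurring in a list of chart types, phrased as A's decision cascade
def pvRank (ts : List String) : Option Int :=
  if "funnel" ∈ ts then some 0
  else if "heatmap" ∈ ts then some 1
  else if "line" ∈ ts ∨ "multi_line" ∈ ts ∨ "area" ∈ ts then some 2
  else if "pie" ∈ ts ∨ "stacked_bar" ∈ ts ∨ "grouped_bar" ∈ ts ∨ "horizontal_bar" ∈ ts ∨ "bar" ∈ ts then some 3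
  else none

lemma pvOptMin_none_left (b : Option Int) : pvOptMin none b = b := rfl

lemma pvOptMin_none_right (a : Option Int) : pvOptMin a none = a := by cases a <;> rfl

lemma pvOptMin_some_some (a p : Int) : pvOptMin (some a) (some p) = some (min a p) := by
  simp only [pvOptMin]
  rcases lt_or_ge p a with h | h
  · rw [if_pos h, min_eq_right h.le]
  · rw [if_neg (not_lt.mpr h), min_eq_left h]

lemma pvOptMin_assoc (a b c : Option Int) :
    pvOptMin (pvOptMin a b) c = pvOptMin a (pvOptMin b c) := by
  cases a <;> cases b <;> cases c <;>
    simp only [pvOptMin_none_left, pvOptMin_none_right, pvOptMin_some_some, min_assoc]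

lemma pvStep_eq (best : Option Int) (item : List (String × String)) :
    pvStep best item = pvOptMin best (pvPriority.get? (pvChartType item)) := by
  cases h : pvPriority.get? (pvChartType item) <;> cases best <;> simp [pvStep, pvOptMin, h]

lemma pvPriority_none (t : String) (h1 : t ≠ "funnel") (h2 : t ≠ "heatmap") (h3 : t ≠ "line")
    (h4 : t ≠ "multi_line") (h5 : t ≠ "area") (h6 : t ≠ "pie") (h7 : t ≠ "stacked_bar")
    (h8 : t ≠ "grouped_bar") (h9 : t ≠ "horizontal_bar") (h10 : t ≠ "bar") :
    pvPriority.get? t = none := by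
  have hp : pvPriority = PySem.Dict.mk [("funnel", 0), ("heatmap", 1),
      ("line", 2), ("multi_line", 2), ("area", 2),
      ("pie", 3), ("stacked_bar", 3), ("grouped_bar", 3), ("horizontal_bar", 3), ("bar", 3)] := by
    decide
  simp only [hp, PySem.Dict.get?_mk_cons, beq_iff_eq]
  rw [if_neg (Ne.symm h1), if_neg (Ne.symm h2), if_neg (Ne.symm h3), if_neg (Ne.symm h4),
    if_neg (Ne.symm h5), if_neg (Ne.symm h6), if_neg (Ne.symm h7), if_neg (Ne.symm h8),
    if_neg (Ne.symm h9), if_neg (Ne.symm h10)]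
  rfl

lemma pvRank_cons (t : String) (ts : List String) :
    pvRank (t :: ts) = pvOptMin (pvPriority.get? t) (pvRank ts) := by
  rcases eq_or_ne t "funnel" with rfl | h1
  · rw [show pvPriority.get? "funnel" = some 0 from by decide]
    simp only [pvRank, List.mem_cons]; simp
    split_ifs <;> simp [pvOptMin]
  rcases eq_or_ne t "heatmap" with rfl | h2
  · rw [show pvPriority.get? "heatmap" = some 1 from by decide]
    simp only [pvRank, List.mem_cons]; simp
    split_ifs <;> simp [pvOptMin]
  rcases eq_or_ne t "line" with rfl | h3
  · rw [show pvPriority.get? "line" = some 2 from by decide]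
    simp only [pvRank, List.mem_cons]; simp
    split_ifs <;> simp [pvOptMin]
  rcases eq_or_ne t "multi_line" with rfl | h4
  · rw [show pvPriority.get? "multi_line" = some 2 from by decide]
    simp only [pvRank, List.mem_cons]; simp
    split_ifs <;> simp [pvOptMin]
  rcases eq_or_ne t "area" with rfl | h5
  · rw [show pvPriority.get? "area" = some 2 from by decide]
    simp only [pvRank, List.mem_cons]; simp
    split_ifs <;> simp [pvOptMin]
  rcases eq_or_ne t "pie" with rfl | h6
  · rw [show pvPriority.get? "pie" = some 3 from by decide]
    simp only [pvRank, List.mem_cons]; simp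
    split_ifs <;> simp [pvOptMin]
  rcases eq_or_ne t "stacked_bar" with rfl | h7
  · rw [show pvPriority.get? "stacked_bar" = some 3 from by decide]
    simp only [pvRank, List.mem_cons]; simp
    split_ifs <;> simp [pvOptMin]
  rcases eq_or_ne t "grouped_bar" with rfl | h8
  · rw [show pvPriority.get? "grouped_bar" = some 3 from by decide]
    simp only [pvRank, List.mem_cons]; simp
    split_ifs <;> simp [pvOptMin]
  rcases eq_or_ne t "horizontal_bar" with rfl | h9
  · rw [show pvPriority.get? "horizontal_bar" = some 3 from by decide]
    simp only [pvRank, List.mem_cons]; simp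
    split_ifs <;> simp [pvOptMin]
  rcases eq_or_ne t "bar" with rfl | h10
  · rw [show pvPriority.get? "bar" = some 3 from by decide]
    simp only [pvRank, List.mem_cons]; simp
    split_ifs <;> simp [pvOptMin]
  · rw [pvPriority_none t h1 h2 h3 h4 h5 h6 h7 h8 h9 h10]
    simp only [pvRank, List.mem_cons, Ne.symm h1, Ne.symm h2, Ne.symm h3, Ne.symm h4,
      Ne.symm h5, Ne.symm h6, Ne.symm h7, Ne.symm h8, Ne.symm h9, Ne.symm h10,
      false_or, pvOptMin]

lemma pvFold_rank (ts : List String) (acc : Option Int) :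
    ts.foldl (fun a t => pvOptMin a (pvPriority.get? t)) acc = pvOptMin acc (pvRank ts) := by
  induction ts generalizing acc with
  | nil => simp [pvRank, pvOptMin_none_right]
  | cons t ts ih => simp only [List.foldl_cons, ih, pvRank_cons, pvOptMin_assoc]

lemma pvInter_ne (ts L : List String) :
    (PySem.Set.inter (PySem.Set.ofList ts) L ≠ []) ↔ ∃ y ∈ L, y ∈ ts := by
  constructor
  · intro h
    rcases List.exists_mem_of_ne_nil _ h with ⟨y, hy⟩
    rw [PySem.Set.mem_inter] at hy
    exact ⟨y, hy.2, (PySem.Set.mem_ofList _ _).mp hy.1⟩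
  · rintro ⟨y, hL, hts⟩ hnil
    have hm : y ∈ PySem.Set.inter (PySem.Set.ofList ts) L :=
      (PySem.Set.mem_inter _ _ _).mpr ⟨(PySem.Set.mem_ofList _ _).mpr hts, hL⟩
    rw [hnil] at hm
    cases hm

-- ===== VERDICT (by name: the statement is the Claim_ definition above) =====
theorem infer_dashboard_intent_spec : Claim_equal_infer_dashboard_intent := by
  intro ca tables _
  unfold Spec_infer_dashboard_intent infer_dashboard_intent infer_dashboard_intent_alt
  have hfold : ca.foldl pvStep none = pvRank (ca.map pvChartType) := by
    have h1 : ca.foldl pvStep none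
        = (ca.map pvChartType).foldl (fun a t => pvOptMin a (pvPriority.get? t)) none := by
      rw [List.foldl_map]
      congr 1
      funext a item
      exact pvStep_eq a item
    rw [h1, pvFold_rank, pvOptMin_none_left]
  rw [hfold]
  have hmem1 := PySem.Set.mem_ofList (ca.map pvChartType) "funnel"
  have hmem2 := PySem.Set.mem_ofList (ca.map pvChartType) "heatmap"
  have hint1 : (PySem.Set.inter (PySem.Set.ofList (ca.map pvChartType)) ["line", "multi_line", "area"] ≠ []) ↔
      ("line" ∈ ca.map pvChartType ∨ "multi_line" ∈ ca.map pvChartType ∨ "area" ∈ ca.map pvChartType) := by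
    rw [pvInter_ne]
    simp only [List.mem_cons, List.not_mem_nil, or_false, exists_eq_or_imp, exists_eq_left]
  have hint2 : (PySem.Set.inter (PySem.Set.ofList (ca.map pvChartType)) ["pie", "stacked_bar", "grouped_bar", "horizontal_bar", "bar"] ≠ []) ↔
      ("pie" ∈ ca.map pvChartType ∨ "stacked_bar" ∈ ca.map pvChartType ∨ "grouped_bar" ∈ ca.map pvChartType ∨ "horizontal_bar" ∈ ca.map pvChartType ∨ "bar" ∈ ca.map pvChartType) := by
    rw [pvInter_ne]
    simp only [List.mem_cons, List.not_mem_nil, or_false, exists_eq_or_imp, exists_eq_left]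
  simp only [hmem1, hmem2, hint1, hint2]
  unfold pvRank
  split_ifs <;> simp [pvResults]
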